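-- pv_equiv track=rewrite | github.com/zakariae20/Digital_Communication | gui_3.py | generate_hdb3_signal
-- ===== SOURCE A (Python) =====
-- def generate_hdb3_signal(binary_data, duration=4):
--     signal = []
--     zero_count = 0
--     last_nonzero = 1
--     for bit in binary_data:
--         if bit == '0':
--             zero_count += 1
--             if zero_count == 4:
--                 if sum(signal[-3*duration:]) == 0:
--                     signal.extend([last_nonzero] * duration)
--                 else:
--                     signal.extend([0] * duration)
--                     continue
--                 zero_count = 0
--             else:
--                 signal.extend([0] * duration)
--         elif bit == '1':
--             if zero_count == 0 or zero_count == 4: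
--                 last_nonzero = -last_nonzero
--             signal.extend([last_nonzero] * duration)
--             zero_count = 0
--         else:
--             raise ValueError("Invalid binary data. Please enter only 0s and 1s.")
--     return signal
-- ===== SOURCE B (Python) =====
-- def generate_hdb3_signal(binary_data, duration=4):
--     # Pass 1: run-length encode: lengths of maximal zero-runs separated by '1's.
--     runs = [0]
--     for ch in binary_data:
--         if ch == '1':
--             runs.append(0)
--         elif ch == '0':
--             runs[-1] += 1
--         else:
--             raise ValueError("Invalid binary data. Please enter only 0s and 1s.")
--     # Pass 2: per run of k zeros emit k//4 substitution groups [0,0,0,p] plus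
--     # k%4 plain zeros; a following '1' flips polarity iff k%4 == 0.
--     # (A's slice-sum "violation" test is provably always true: when its
--     # zero_count hits 4 the previous three symbols are three zeros.)
--     symbols = []
--     p = 1
--     for i, k in enumerate(runs):
--         q, r = divmod(k, 4)
--         symbols += [0, 0, 0, p] * q + [0] * r
--         if i < len(runs) - 1:          # a '1' follows this run
--             p = -p if r == 0 else p
--             symbols.append(p)
--     # Pass 3: expand each symbol to `duration` samples.
--     samples = []
--     for s in symbols:
--         samples += [s] * duration
--     return samples
-- ===== Notes on version B (the rewrite author's own statement) =====
-- stated objective: alternative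
-- what changed: B replaces A's per-bit state machine (zero_count, slice-and-sum violation test) by run-length arithmetic: it run-length encodes the zero runs, emits k//4 substitution groups plus k%4 zeros per run via divmod, flips polarity at a '1' iff k%4==0, and expands symbols to samples in a final pass; this relies on the proved fact that A's sum(signal[-3*duration:])!=0 branch is dead code.
import Mathlib
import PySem

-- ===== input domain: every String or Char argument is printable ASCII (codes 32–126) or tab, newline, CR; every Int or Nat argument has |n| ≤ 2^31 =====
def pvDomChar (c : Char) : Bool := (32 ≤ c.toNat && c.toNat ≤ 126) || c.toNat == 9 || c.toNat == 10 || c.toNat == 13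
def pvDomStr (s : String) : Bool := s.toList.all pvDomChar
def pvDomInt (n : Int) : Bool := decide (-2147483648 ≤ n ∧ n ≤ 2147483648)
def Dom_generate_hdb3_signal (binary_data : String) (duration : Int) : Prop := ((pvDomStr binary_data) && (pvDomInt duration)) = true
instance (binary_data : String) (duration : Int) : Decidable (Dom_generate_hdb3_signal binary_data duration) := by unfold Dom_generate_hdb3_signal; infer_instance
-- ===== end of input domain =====

-- B replaces A's per-bit state machine by run-length arithmetic (zero-run lengths,
-- divmod per run, polarity flip iff run length % 4 == 0), exploiting the proved fact
-- that A's sum(signal[-3*duration:]) != 0 branch is dead code.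

-- ===== PORT A =====
-- literal transliteration of A's loop; on an invalid character Python raises ValueError
-- (excluded by Pre_), here the loop stops and returns the signal built so far.
def pvALoop (bits : List Char) (signal : List Int) (zero_count last_nonzero duration : Int) :
    List Int :=
  match bits with
  | [] => signal
  | bit :: rest =>
    if bit = '0' then
      if zero_count + 1 = 4 then
        if (PySem.List.slice signal (some (-(3 * duration))) none).sum = 0 then
          pvALoop rest (signal ++ List.replicate duration.toNat last_nonzero) 0 last_nonzero duration
        else
          pvALoop rest (signal ++ List.replicate duration.toNat 0) (zero_count + 1) last_nonzero duration
      else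
        pvALoop rest (signal ++ List.replicate duration.toNat 0) (zero_count + 1) last_nonzero duration
    else if bit = '1' then
      pvALoop rest
        (signal ++ List.replicate duration.toNat (if zero_count = 0 ∨ zero_count = 4 then -last_nonzero else last_nonzero))
        0 (if zero_count = 0 ∨ zero_count = 4 then -last_nonzero else last_nonzero) duration
    else signal

def generate_hdb3_signal (binary_data : String) (duration : Int) : List Int :=
  pvALoop binary_data.toList [] 0 1 duration

-- ===== PORT B =====
-- pass 1 of Source B: run-length encode the maximal zero-runs (runs[-1] += 1 ported as
-- dropLast ++ [last + 1]; runs is never empty); on an invalid character Python raises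
-- ValueError (excluded by Pre_), here the loop stops with the runs built so far.
def pvRuns (bits : List Char) (runs : List Int) : List Int :=
  match bits with
  | [] => runs
  | ch :: rest =>
    if ch = '1' then pvRuns rest (runs ++ [0])
    else if ch = '0' then pvRuns rest (runs.dropLast ++ [(runs.getLast?.getD 0) + 1])
    else runs

-- pass 2 of Source B: divmod per run, polarity flip iff r == 0 before a following '1'
def pvPass1 (runs : List Int) (symbols : List Int) (p : Int) : List Int :=
  match runs with
  | [] => symbols
  | k :: rest =>
    let q := PySem.Int.floordiv k 4
    let r := PySem.Int.mod k 4
    let symbols' := symbols ++ (List.replicate q.toNat ([0, 0, 0, p] : List Int)).flatten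
        ++ List.replicate r.toNat (0 : Int)
    match rest with
    | [] => symbols'
    | _ :: _ =>
      pvPass1 rest (symbols' ++ [if r = 0 then -p else p]) (if r = 0 then -p else p)

-- pass 3 of Source B: expand each symbol to `duration` samples
def generate_hdb3_signal_alt (binary_data : String) (duration : Int) : List Int :=
  (pvPass1 (pvRuns binary_data.toList [0]) [] 1).foldl
    (fun acc s => acc ++ List.replicate duration.toNat s) []

-- ===== PRECONDITION & SPEC =====
-- Pre_ excludes exactly the strings containing a character other than '0'/'1',
-- on which the Python A raises ValueError.
def Pre_generate_hdb3_signal (binary_data : String) (duration : Int) : Prop :=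
  (binary_data.toList.all (fun ch => ch == '0' || ch == '1')) = true
instance (binary_data : String) (duration : Int) :
    Decidable (Pre_generate_hdb3_signal binary_data duration) := by
  unfold Pre_generate_hdb3_signal; infer_instance
def pvWitness_generate_hdb3_signal : String × Int := ("1000011", 2)

def Spec_generate_hdb3_signal (binary_data : String) (duration : Int) (out : List Int) : Prop := out = generate_hdb3_signal_alt binary_data duration
instance (binary_data : String) (duration : Int) (out : List Int) : Decidable (Spec_generate_hdb3_signal binary_data duration out) := by unfold Spec_generate_hdb3_signal; infer_instance

-- ===== CLAIM (what is proved, stated in full; the proofs are below) =====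
def Claim_equal_generate_hdb3_signal : Prop := ∀ (binary_data : String) (duration : Int), Dom_generate_hdb3_signal binary_data duration → Pre_generate_hdb3_signal binary_data duration → Spec_generate_hdb3_signal binary_data duration (generate_hdb3_signal binary_data duration)

-- ===== LEMMAS AND PROOFS =====

theorem pvDropAppend (l1 l2 : List Int) (n : Nat) :
    (l1 ++ l2).drop n = l1.drop n ++ l2.drop (n - l1.length) := by
  induction l1 generalizing n with
  | nil => simp
  | cons x t ih =>
    cases n with
    | zero => simp
    | succ m => simpa using ih m

-- expansion of a symbol list to samples (the meaning of Source B's pass 3)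
def pvExpand (dn : Nat) (l : List Int) : List Int := l.flatMap (fun s => List.replicate dn s)

theorem pvExpand_append (dn : Nat) (l : List Int) (e : Int) :
    pvExpand dn (l ++ [e]) = pvExpand dn l ++ List.replicate dn e := by
  simp [pvExpand]

theorem pvFoldl_expand (dn : Nat) (l acc : List Int) :
    l.foldl (fun acc s => acc ++ List.replicate dn s) acc = acc ++ pvExpand dn l := by
  induction l generalizing acc with
  | nil => simp [pvExpand]
  | cons x t ih => simp [List.foldl, ih, pvExpand, List.append_assoc]

theorem pvExpand_zero (l : List Int) : pvExpand 0 l = [] := by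
  simp [pvExpand]

theorem pvExpand_length (dn : Nat) (l : List Int) :
    (pvExpand dn l).length = l.length * dn := by
  induction l with
  | nil => simp [pvExpand]
  | cons x t ih =>
    simp only [pvExpand, List.flatMap_cons, List.length_append, List.length_replicate,
      List.length_cons] at ih ⊢
    rw [ih, Nat.succ_mul]; omega

theorem pvExpand_sum (dn : Nat) (l : List Int) :
    (pvExpand dn l).sum = (dn : Int) * l.sum := by
  induction l with
  | nil => simp [pvExpand]
  | cons x t ih =>
    simp only [pvExpand, List.flatMap_cons, List.sum_append, List.sum_replicate,
      List.sum_cons, nsmul_eq_mul] at ih ⊢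
    rw [ih]; ring

theorem pvExpand_drop (dn : Nat) (l : List Int) (k : Nat) :
    (pvExpand dn l).drop (k * dn) = pvExpand dn (l.drop k) := by
  induction k generalizing l with
  | zero => simp
  | succ k ih =>
    cases l with
    | nil => simp [pvExpand]
    | cons x t =>
      have h2 : pvExpand dn (x :: t) = List.replicate dn x ++ pvExpand dn t := by
        simp [pvExpand]
      rw [h2, pvDropAppend]
      have h3 : (List.replicate dn (x : Int)).drop ((k + 1) * dn) = [] := by
        apply List.drop_eq_nil_of_le
        simp [Nat.succ_mul]
      rw [h3, List.length_replicate,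
        show (k + 1) * dn - dn = k * dn by rw [Nat.succ_mul]; omega,
        List.nil_append, ih t, List.drop_succ_cons]

-- intermediate per-bit symbol machine with the rolling triple (a,b,c) of the last
-- three symbols, mirroring A's decisions one symbol per bit
def pvSymT (bits : List Char) (syms : List Int) (a b c zero_count last_nonzero : Int) :
    List Int :=
  match bits with
  | [] => syms
  | bit :: rest =>
    if bit = '1' then
      pvSymT rest (syms ++ [if zero_count = 0 ∨ zero_count = 4 then -last_nonzero else last_nonzero])
        b c (if zero_count = 0 ∨ zero_count = 4 then -last_nonzero else last_nonzero)
        0 (if zero_count = 0 ∨ zero_count = 4 then -last_nonzero else last_nonzero)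
    else if bit = '0' then
      if zero_count + 1 ≠ 4 then
        pvSymT rest (syms ++ [0]) b c 0 (zero_count + 1) last_nonzero
      else if a + b + c = 0 then
        pvSymT rest (syms ++ [last_nonzero]) b c last_nonzero 0 last_nonzero
      else
        pvSymT rest (syms ++ [0]) b c 0 (zero_count + 1) last_nonzero
    else syms

-- the rolling triple: [a,b,c] = the last three symbols, left-padded with zeros
theorem pvTrip_step (syms : List Int) (a b c e : Int)
    (h : ((0 : Int) :: 0 :: 0 :: syms).drop syms.length = [a, b, c]) :
    ((0 : Int) :: 0 :: 0 :: (syms ++ [e])).drop (syms ++ [e]).length = [b, c, e] := by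
  have h1 : ((0 : Int) :: 0 :: 0 :: syms).drop (syms.length + 1) = [b, c] := by
    rw [← List.tail_drop, h]; rfl
  have h2 : ((0 : Int) :: 0 :: 0 :: (syms ++ [e])) = ((0 : Int) :: 0 :: 0 :: syms) ++ [e] := by
    simp
  rw [h2, pvDropAppend]
  simp only [List.length_append, List.length_cons, List.length_nil]
  rw [show syms.length + 1 - (syms.length + 1 + 1 + 1) = 0 from by omega]
  rw [show syms.length + 1 = syms.length + 1 from rfl, h1]
  rfl

theorem pvTrip_sum (syms : List Int) (a b c : Int)
    (h : ((0 : Int) :: 0 :: 0 :: syms).drop syms.length = [a, b, c]) :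
    (syms.drop (syms.length - 3)).sum = a + b + c := by
  match syms with
  | [] =>
    obtain ⟨ha, h'⟩ := List.cons_eq_cons.mp h
    obtain ⟨hb, h''⟩ := List.cons_eq_cons.mp h'
    obtain ⟨hc, -⟩ := List.cons_eq_cons.mp h''
    simp [← ha, ← hb, ← hc]
  | [x] =>
    obtain ⟨ha, h'⟩ := List.cons_eq_cons.mp h
    obtain ⟨hb, h''⟩ := List.cons_eq_cons.mp h'
    obtain ⟨hc, -⟩ := List.cons_eq_cons.mp h''
    simp [← ha, ← hb, ← hc]
  | [x, y] =>
    obtain ⟨ha, h'⟩ := List.cons_eq_cons.mp h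
    obtain ⟨hb, h''⟩ := List.cons_eq_cons.mp h'
    obtain ⟨hc, -⟩ := List.cons_eq_cons.mp h''
    simp only [List.length_cons, List.length_nil]
    rw [show 0 + 1 + 1 - 3 = 0 from by omega]
    simp [← ha, ← hb, ← hc]
    try ring
  | x :: y :: z :: t =>
    have hl : (x :: y :: z :: t : List Int).length = t.length + 3 := by simp
    have hdrop : ((0 : Int) :: 0 :: 0 :: x :: y :: z :: t).drop (t.length + 3) =
        (x :: y :: z :: t).drop t.length := by
      have he : ((0 : Int) :: 0 :: 0 :: x :: y :: z :: t)
          = [0, 0, 0] ++ (x :: y :: z :: t) := rfl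
      rw [he, pvDropAppend]
      rw [List.drop_eq_nil_of_le (by simp)]
      simp
    rw [hl] at h ⊢
    rw [hdrop] at h
    rw [show t.length + 3 - 3 = t.length from by omega, h]
    simp
    try ring

-- A's slice-and-sum test equals d * (triple sum), for d ≥ 1
theorem pvSlice_sum (d : Int) (hd : 1 ≤ d) (syms : List Int) (a b c : Int)
    (h : ((0 : Int) :: 0 :: 0 :: syms).drop syms.length = [a, b, c]) :
    (PySem.List.slice (pvExpand d.toNat syms) (some (-(3 * d))) none).sum
      = d * (a + b + c) := by
  have hk : (0 : Nat) < (3 * d).toNat := by omega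
  have hcast : -(3 * d) = -(((3 * d).toNat : Nat) : Int) := by omega
  rw [hcast, PySem.List.slice_from_neg_natCast _ _ hk]
  have h3 : (3 * d).toNat = 3 * d.toNat := by omega
  rw [pvExpand_length, h3]
  rw [show syms.length * d.toNat - 3 * d.toNat = (syms.length - 3) * d.toNat from
    (Nat.sub_mul syms.length 3 d.toNat).symm]
  rw [pvExpand_drop, pvExpand_sum, pvTrip_sum syms a b c h]
  rw [show ((d.toNat : Nat) : Int) = d from by omega]

-- invariant: with d ≥ 1, A's sample-level loop is the expansion of the triple machine
theorem pvKey (bits : List Char) (d : Int) (hd : 1 ≤ d) (syms : List Int)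
    (a b c zc ln : Int)
    (htrip : ((0 : Int) :: 0 :: 0 :: syms).drop syms.length = [a, b, c]) :
    pvALoop bits (pvExpand d.toNat syms) zc ln d
      = pvExpand d.toNat (pvSymT bits syms a b c zc ln) := by
  induction bits generalizing syms a b c zc ln with
  | nil => rfl
  | cons bit rest ih =>
    by_cases h0 : bit = '0'
    · subst h0
      rw [pvALoop, pvSymT]
      rw [if_pos (show ('0' : Char) = '0' from rfl),
        if_neg (show ¬ ('0' : Char) = '1' from by decide),
        if_pos (show ('0' : Char) = '0' from rfl)]
      by_cases h4 : zc + 1 = 4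
      · rw [if_pos h4, if_neg (show ¬ (zc + 1 ≠ 4) from not_not_intro h4)]
        rw [pvSlice_sum d hd syms a b c htrip]
        by_cases hs : a + b + c = 0
        · rw [if_pos (show d * (a + b + c) = 0 from by rw [hs]; ring),
            if_pos hs, ← pvExpand_append]
          exact ih (syms ++ [ln]) b c ln 0 ln (pvTrip_step syms a b c ln htrip)
        · have hne : ¬ d * (a + b + c) = 0 := by
            intro hh
            rcases mul_eq_zero.mp hh with h' | h'
            · omega
            · exact hs h'
          rw [if_neg hne, if_neg hs, ← pvExpand_append]
          exact ih (syms ++ [0]) b c 0 (zc + 1) ln (pvTrip_step syms a b c 0 htrip)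
      · rw [if_neg h4, if_pos (show zc + 1 ≠ 4 from h4), ← pvExpand_append]
        exact ih (syms ++ [0]) b c 0 (zc + 1) ln (pvTrip_step syms a b c 0 htrip)
    · by_cases h1 : bit = '1'
      · subst h1
        rw [pvALoop, pvSymT]
        rw [if_neg (show ¬ ('1' : Char) = '0' from by decide),
          if_pos (show ('1' : Char) = '1' from rfl), ← pvExpand_append]
        exact ih (syms ++ [if zc = 0 ∨ zc = 4 then -ln else ln]) b c _ 0 _
          (pvTrip_step syms a b c _ htrip)
      · rw [pvALoop, pvSymT]
        simp only [if_neg h0, if_neg h1]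

-- clean per-bit symbol machine, no triple (the a+b+c = 0 test of pvSymT is always
-- true at its test point; the zero_count = 4 flip case is unreachable)
def pvSym (bits : List Char) (zc p : Int) : List Int :=
  match bits with
  | [] => []
  | ch :: rest =>
    if ch = '0' then
      if zc + 1 = 4 then p :: pvSym rest 0 p else 0 :: pvSym rest (zc + 1) p
    else if ch = '1' then
      (if zc = 0 then -p else p) :: pvSym rest 0 (if zc = 0 then -p else p)
    else []

-- pvSymT = accumulator ++ pvSym, under the reachable-state invariant
theorem pvSymT_eq (bits : List Char) (syms : List Int) (a b c zc p : Int)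
    (h03 : 0 ≤ zc ∧ zc ≤ 3) (hc : 1 ≤ zc → c = 0) (hb : 2 ≤ zc → b = 0)
    (ha : 3 ≤ zc → a = 0) :
    pvSymT bits syms a b c zc p = syms ++ pvSym bits zc p := by
  induction bits generalizing syms a b c zc p with
  | nil => simp [pvSymT, pvSym]
  | cons ch rest ih =>
    by_cases h1 : ch = '1'
    · subst h1
      rw [pvSymT, pvSym]
      rw [if_pos (show ('1' : Char) = '1' from rfl),
        if_neg (show ¬ ('1' : Char) = '0' from by decide),
        if_pos (show ('1' : Char) = '1' from rfl)]
      have hz : (zc = 0 ∨ zc = 4) ↔ zc = 0 := by omega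
      simp only [hz]
      have ihx := ih (syms ++ [if zc = 0 then -p else p]) b c (if zc = 0 then -p else p)
        0 (if zc = 0 then -p else p) ⟨by omega, by omega⟩
        (fun h => absurd h (by omega)) (fun h => absurd h (by omega))
        (fun h => absurd h (by omega))
      rw [ihx]
      simp
    · by_cases h0 : ch = '0'
      · subst h0
        rw [pvSymT, pvSym]
        rw [if_neg (show ¬ ('0' : Char) = '1' from by decide),
          if_pos (show ('0' : Char) = '0' from rfl),
          if_pos (show ('0' : Char) = '0' from rfl)]
        by_cases h4 : zc + 1 = 4
        · have hz : zc = 3 := by omega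
          have : a + b + c = 0 := by
            rw [ha (by omega), hb (by omega), hc (by omega)]; ring
          rw [if_neg (not_not_intro h4), if_pos this, if_pos h4]
          have ihx := ih (syms ++ [p]) b c p 0 p ⟨by omega, by omega⟩
            (fun h => absurd h (by omega)) (fun h => absurd h (by omega))
            (fun h => absurd h (by omega))
          rw [ihx]
          simp
        · rw [if_pos h4, if_neg h4]
          have ihx := ih (syms ++ [0]) b c 0 (zc + 1) p ⟨by omega, by omega⟩
            (fun _ => rfl) (fun h => hc (by omega)) (fun h => hb (by omega))
          rw [ihx]
          simp
      · rw [pvSymT, pvSym]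
        simp only [if_neg h0, if_neg h1]
        simp

-- run-length encoding of the zero runs (proof-side mirror of pass 1 on valid bits)
def pvRLE (bits : List Char) (k : Int) : List Int :=
  match bits with
  | [] => [k]
  | ch :: rest => if ch = '1' then k :: pvRLE rest 0 else pvRLE rest (k + 1)

theorem pvRLE_ne_nil (bits : List Char) (k : Int) : pvRLE bits k ≠ [] := by
  induction bits generalizing k with
  | nil => simp [pvRLE]
  | cons ch rest ih =>
    rw [pvRLE]
    split_ifs
    · simp
    · exact ih _

-- pass 1 builds exactly the run-length encoding
theorem pvRuns_eq (bits : List Char) (init : List Int) (k : Int)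
    (hv : ∀ c ∈ bits, c = '0' ∨ c = '1') :
    pvRuns bits (init ++ [k]) = init ++ pvRLE bits k := by
  induction bits generalizing init k with
  | nil => simp [pvRuns, pvRLE]
  | cons ch rest ih =>
    have hv' : ∀ c ∈ rest, c = '0' ∨ c = '1' := fun c hc => hv c (List.mem_cons_of_mem _ hc)
    rcases hv ch (List.mem_cons_self) with h0 | h1
    · subst h0
      rw [pvRuns, pvRLE]
      rw [if_neg (show ¬ ('0' : Char) = '1' from by decide),
        if_pos (show ('0' : Char) = '0' from rfl),
        if_neg (show ¬ ('0' : Char) = '1' from by decide)]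
      rw [List.dropLast_concat, List.getLast?_concat]
      exact ih init (k + 1) hv'
    · subst h1
      rw [pvRuns, pvRLE]
      rw [if_pos (show ('1' : Char) = '1' from rfl),
        if_pos (show ('1' : Char) = '1' from rfl)]
      rw [show (init ++ [k]) ++ [(0 : Int)] = (init ++ [k]) ++ [0] from rfl]
      rw [ih (init ++ [k]) 0 hv']
      simp

-- the symbols one run of k zeros contributes: k//4 groups [0,0,0,p] plus k%4 zeros
def pvGrp (k p : Int) : List Int :=
  (List.replicate (PySem.Int.floordiv k 4).toNat ([0, 0, 0, p] : List Int)).flatten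
    ++ List.replicate (PySem.Int.mod k 4).toNat (0 : Int)

-- accumulator-free meaning of pass 2
def pvRunSyms (runs : List Int) (p : Int) : List Int :=
  match runs with
  | [] => []
  | [k] => pvGrp k p
  | k :: rest@(_ :: _) =>
    pvGrp k p ++ (if PySem.Int.mod k 4 = 0 then -p else p)
      :: pvRunSyms rest (if PySem.Int.mod k 4 = 0 then -p else p)

theorem pvPass1_eq (runs : List Int) (acc : List Int) (p : Int) :
    pvPass1 runs acc p = acc ++ pvRunSyms runs p := by
  induction runs generalizing acc p with
  | nil => simp [pvPass1, pvRunSyms]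
  | cons k rest ih =>
    cases rest with
    | nil => simp [pvPass1, pvRunSyms, pvGrp]
    | cons k' rest' =>
      rw [pvPass1, pvRunSyms]
      rw [ih]
      simp [pvGrp, List.append_assoc]

theorem pvGrp_natCast (n : Nat) (p : Int) :
    pvGrp (n : Int) p = (List.replicate (n / 4) ([0, 0, 0, p] : List Int)).flatten
      ++ List.replicate (n % 4) (0 : Int) := by
  have h1 : PySem.Int.floordiv (n : Int) 4 = ((n / 4 : Nat) : Int) := by
    simp [PySem.Int.floordiv, Int.fdiv_eq_ediv]
  have h2 : PySem.Int.mod (n : Int) 4 = ((n % 4 : Nat) : Int) := by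
    simp [PySem.Int.mod, Int.fmod_eq_emod]
  rw [pvGrp, h1, h2, Int.toNat_natCast, Int.toNat_natCast]

theorem pvMod_natCast (n : Nat) :
    PySem.Int.mod (n : Int) 4 = ((n % 4 : Nat) : Int) := by
  simp [PySem.Int.mod, Int.fmod_eq_emod]

theorem pvGrp_zero (p : Int) : pvGrp 0 p = [] := rfl

theorem pvFlattenRep (q : Nat) (L : List Int) :
    (List.replicate (q + 1) L).flatten = (List.replicate q L).flatten ++ L := by
  rw [List.replicate_succ', List.flatten_append]
  simp

-- one more zero extends the run's symbol block by one symbol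
theorem pvGrp_step3 (n : Nat) (p : Int) (h : n % 4 = 3) :
    pvGrp (n : Int) p ++ [p] = pvGrp ((n : Int) + 1) p := by
  rw [show ((n : Int) + 1) = ((n + 1 : Nat) : Int) from by push_cast; ring]
  rw [pvGrp_natCast, pvGrp_natCast]
  rw [show (n + 1) / 4 = n / 4 + 1 from by omega, show (n + 1) % 4 = 0 from by omega,
    pvFlattenRep, h]
  simp [List.replicate_succ]

theorem pvGrp_step (n : Nat) (p : Int) (h : ¬ n % 4 = 3) :
    pvGrp (n : Int) p ++ [0] = pvGrp ((n : Int) + 1) p := by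
  rw [show ((n : Int) + 1) = ((n + 1 : Nat) : Int) from by push_cast; ring]
  rw [pvGrp_natCast, pvGrp_natCast]
  rw [show (n + 1) / 4 = n / 4 from by omega, show (n + 1) % 4 = n % 4 + 1 from by omega]
  rw [List.replicate_succ']
  simp

-- the per-bit machine started mid-run equals the run-level computation
theorem pvSym_runSyms (bits : List Char) (n : Nat) (p : Int)
    (hv : ∀ c ∈ bits, c = '0' ∨ c = '1') :
    pvGrp (n : Int) p ++ pvSym bits ((n % 4 : Nat) : Int) p
      = pvRunSyms (pvRLE bits (n : Int)) p := by
  induction bits generalizing n p with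
  | nil => simp [pvSym, pvRLE, pvRunSyms]
  | cons ch rest ih =>
    have hv' : ∀ c ∈ rest, c = '0' ∨ c = '1' := fun c hc => hv c (List.mem_cons_of_mem _ hc)
    rcases hv ch (List.mem_cons_self) with h0 | h1
    · subst h0
      rw [pvSym, pvRLE]
      rw [if_pos (show ('0' : Char) = '0' from rfl),
        if_neg (show ¬ ('0' : Char) = '1' from by decide)]
      by_cases h3 : n % 4 = 3
      · rw [if_pos (show ((n % 4 : Nat) : Int) + 1 = 4 from by rw [h3]; norm_num)]
        have : pvGrp (n : Int) p ++ p :: pvSym rest 0 p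
            = (pvGrp (n : Int) p ++ [p]) ++ pvSym rest 0 p := by simp
        rw [this, pvGrp_step3 n p h3]
        have h0' : ((0 : Int)) = (((n + 1) % 4 : Nat) : Int) := by
          rw [show (n + 1) % 4 = 0 from by omega]; simp
        rw [h0', show ((n : Int) + 1) = ((n + 1 : Nat) : Int) from by push_cast; ring]
        exact ih (n + 1) p hv'
      · rw [if_neg (show ¬ (((n % 4 : Nat) : Int) + 1 = 4) from by omega)]
        have : pvGrp (n : Int) p ++ (0 : Int) :: pvSym rest (((n % 4 : Nat) : Int) + 1) p
            = (pvGrp (n : Int) p ++ [0]) ++ pvSym rest (((n % 4 : Nat) : Int) + 1) p := by simp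
        rw [this, pvGrp_step n p h3]
        have hzc : ((n % 4 : Nat) : Int) + 1 = (((n + 1) % 4 : Nat) : Int) := by
          rw [show (n + 1) % 4 = n % 4 + 1 from by omega]; push_cast; ring
        rw [hzc, show ((n : Int) + 1) = ((n + 1 : Nat) : Int) from by push_cast; ring]
        exact ih (n + 1) p hv'
    · subst h1
      rw [pvSym, pvRLE]
      rw [if_neg (show ¬ ('1' : Char) = '0' from by decide),
        if_pos (show ('1' : Char) = '1' from rfl),
        if_pos (show ('1' : Char) = '1' from rfl)]
      have hcond : (((n % 4 : Nat) : Int) = 0) ↔ (PySem.Int.mod (n : Int) 4 = 0) := by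
        rw [pvMod_natCast]
      obtain ⟨k', rest', hrle⟩ : ∃ k' rest', pvRLE rest 0 = k' :: rest' := by
        cases hR : pvRLE rest 0 with
        | nil => exact absurd hR (pvRLE_ne_nil rest 0)
        | cons k' rest' => exact ⟨k', rest', rfl⟩
      rw [hrle, pvRunSyms, ← hrle]
      set p' := if PySem.Int.mod (n : Int) 4 = 0 then -p else p with hp'
      have hflip : (if ((n % 4 : Nat) : Int) = 0 then -p else p) = p' := by
        rw [hp']
        by_cases hz : ((n % 4 : Nat) : Int) = 0
        · rw [if_pos hz, if_pos (hcond.mp hz)]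
        · rw [if_neg hz, if_neg (fun hh => hz (hcond.mpr hh))]
      rw [hflip]
      have := ih 0 p' hv'
      simp only [Nat.zero_mod, Nat.cast_zero] at this
      simp only [pvGrp_zero, List.nil_append] at this
      rw [this]

-- with duration ≤ 0 every appended run is empty: A's signal never grows
theorem pvALoop_zero (bits : List Char) (signal : List Int) (zc ln d : Int)
    (hd : d.toNat = 0) : pvALoop bits signal zc ln d = signal := by
  induction bits generalizing signal zc ln with
  | nil => rfl
  | cons bit rest ih =>
    rw [pvALoop]
    simp only [hd, List.replicate_zero, List.append_nil]
    split_ifs <;> first | exact ih _ _ _ | rfl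

-- ===== VERDICT (by name: the statement is the Claim_ definition above) =====
theorem generate_hdb3_signal_spec : Claim_equal_generate_hdb3_signal := by
  intro binary_data duration _ hpre
  unfold Spec_generate_hdb3_signal generate_hdb3_signal generate_hdb3_signal_alt
  have hv : ∀ c ∈ binary_data.toList, c = '0' ∨ c = '1' := by
    intro c hc
    unfold Pre_generate_hdb3_signal at hpre
    rw [List.all_eq_true] at hpre
    have := hpre c hc
    rcases Bool.or_eq_true_iff.mp this with h | h
    · exact Or.inl (eq_of_beq h)
    · exact Or.inr (eq_of_beq h)
  rw [pvFoldl_expand, List.nil_append]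
  rw [show ([(0 : Int)] : List Int) = [] ++ [(0 : Int)] from rfl,
    pvRuns_eq binary_data.toList [] 0 hv, List.nil_append, pvPass1_eq, List.nil_append]
  by_cases hd : 1 ≤ duration
  · have h0 : ([] : List Int) = pvExpand duration.toNat [] := rfl
    rw [h0, pvKey binary_data.toList duration hd [] 0 0 0 0 1 (by rfl)]
    rw [pvSymT_eq binary_data.toList [] 0 0 0 0 1 ⟨le_refl 0, by omega⟩
      (by omega) (by omega) (by omega), List.nil_append]
    have := pvSym_runSyms binary_data.toList 0 1 hv
    simp only [Nat.zero_mod, Nat.cast_zero] at this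
    simp only [pvGrp_zero, List.nil_append] at this
    rw [this]
  · have hdz : duration.toNat = 0 := by omega
    rw [pvALoop_zero _ _ _ _ _ hdz, hdz, pvExpand_zero]
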